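-- pv_equiv track=rewrite | github.com/plsuwu/CAB203 | project.py | gamesOK
-- ===== SOURCE A (Python) =====
-- def gamesOK(games: set) -> bool:
--     # each `Tournament` is defined by a set of Bonkers games `A`, a set of players `P`
--     #
--     # each game `g` is played by a player and their opponent, `(p,o)`, where the game `(p,o)`
--     #   is the same as `(o,p)` and `p` is any player from the set of players `P`
--     #   and their opponent `o` is any player in `P` other than `p` - in other words, `o` is any item in `P` where `o != p`.
--     #
--     # a 'valid' tournament must contain games `A` such that any player `p` plays the same number
--     #   of games `Pg` as any opponent `o` such that any `|Pg(p,o)| == |Pg(o,o)|`.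
--     #
--     # a 'valid' tournament must contain games where all players `p` play against all other
--     #   opponents `o` at least once, or play against a minimum of two opponents such that
--     #   !(p1,p2) -> ((p1,o1) and (p1,o2)) and ((p2,o1) and (p2,o2))
--
--     # number of unique vertices is the set of all p in {(p,o) | (o,p)}
--     S = {a for (a, b) in games} | {b for (a, b) in games}
--     E = games | {(a, b) for (b, a) in games}  # all possible edges 2|E|
--
--     # unique vertices x that forms an edge with any u in S
--     N = {x: {u for (v, u) in E if v == x} for (x, y) in E}
--
--     # number of edges containing both v and any vertex u in S
--     d = {len(N[u]) for u in S}
--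
--     # invalid if there is a differing number of edges for any u in N
--     if len(d) != 1:
--         return False
--
--     # if (u,v) is not an edge in E, determine the intersect for non-(u,v) edges that
--     # contain either u or v as a vertex
--     #
--     # valid if the length of this intersect is >= 2, otherwise invalid
--     e = all((len(N[v] & N[u])) >= 2 for u in S for v in S if v != u and u not in N[v])
--
--     return e
-- ===== SOURCE B (Python) =====
-- def gamesOK(games: set) -> bool:
--     # Wedge counting: build adjacency in one pass; then for each middle vertex w
--     # increment a table entry for every pair of distinct neighbors of w, so the
--     # common-neighbor count of each pair is read from the table instead of being
--     # recomputed by set intersection for every non-adjacent pair.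
--     adj = {}
--     for a, b in games:
--         adj.setdefault(a, set()).add(b)
--         adj.setdefault(b, set()).add(a)
--     if not adj:
--         return False
--     if len({len(s) for s in adj.values()}) != 1:
--         return False
--     common = {}
--     for w in adj:
--         seen = []
--         for u in adj[w]:
--             for v in seen:
--                 common[(u, v)] = common.get((u, v), 0) + 1
--                 common[(v, u)] = common.get((v, u), 0) + 1
--             seen.append(u)
--     return all(common.get((u, v), 0) >= 2
--                for u in adj for v in adj
--                if v != u and u not in adj[v])
-- ===== Notes on version B (the rewrite author's own statement) =====
-- stated objective: faster
-- what changed: B builds the adjacency map in one pass (instead of A's symmetric edge closure re-scanned once per key) and replaces A's per-pair neighbor-set intersection by a wedge-count table: one pass over middle vertices increments a counter for every unordered pair of distinct neighbors, and the non-adjacent-pair test just reads common.get((u,v),0).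
import Mathlib
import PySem

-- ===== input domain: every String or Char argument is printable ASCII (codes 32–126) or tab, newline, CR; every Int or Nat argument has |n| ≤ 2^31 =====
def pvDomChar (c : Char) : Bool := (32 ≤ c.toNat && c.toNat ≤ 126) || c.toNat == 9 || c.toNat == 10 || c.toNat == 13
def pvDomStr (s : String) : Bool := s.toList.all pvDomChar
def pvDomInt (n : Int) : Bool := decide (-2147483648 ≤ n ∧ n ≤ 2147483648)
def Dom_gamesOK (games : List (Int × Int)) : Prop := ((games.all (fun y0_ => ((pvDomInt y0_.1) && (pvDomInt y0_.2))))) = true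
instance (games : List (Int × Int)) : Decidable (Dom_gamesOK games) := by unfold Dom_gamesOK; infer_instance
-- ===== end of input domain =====

-- B replaces A's per-pair neighbor-set intersection by a wedge-count table: one pass over
-- middle vertices increments a counter for every pair of distinct neighbors, and the
-- non-adjacent-pair test reads that table; the adjacency map is built in one pass instead
-- of via the symmetric edge closure.  Equal return values proved for all inputs.

-- ===== PORT A =====
-- S = {a for (a,b) in games} | {b for (a,b) in games}
def pyA_S (games : List (Int × Int)) : PySem.Set Int :=
  PySem.Set.union (PySem.Set.ofList (games.map (fun p => p.1))) (games.map (fun p => p.2))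
-- E = games | {(a,b) for (b,a) in games}
def pyA_E (games : List (Int × Int)) : PySem.Set (Int × Int) :=
  PySem.Set.union (PySem.Set.ofList games) (games.map (fun p => (p.2, p.1)))
-- {u for (v,u) in E if v == x}
def pyA_nbr (games : List (Int × Int)) (x : Int) : PySem.Set Int :=
  PySem.Set.ofList (((pyA_E games).filter (fun q => q.1 == x)).map (fun q => q.2))
-- N = {x: {u for (v,u) in E if v == x} for (x,y) in E}
def pyA_N (games : List (Int × Int)) : PySem.Dict Int (PySem.Set Int) :=
  (pyA_E games).foldl (fun d p => d.insert p.1 (pyA_nbr games p.1)) PySem.Dict.empty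

def gamesOK (games : List (Int × Int)) : Bool :=
  let S := pyA_S games
  let N := pyA_N games
  -- d = {len(N[u]) for u in S}
  let d : PySem.Set Int := PySem.Set.ofList (S.map (fun u => PySem.Set.len (N.getD u PySem.Set.empty)))
  if PySem.Set.len d ≠ 1 then false
  else
    -- all(len(N[v] & N[u]) >= 2 for u in S for v in S if v != u and u not in N[v])
    S.all (fun u => S.all (fun v =>
      if v ≠ u ∧ ¬ (PySem.Set.contains (N.getD v PySem.Set.empty) u = true) then
        decide (2 ≤ PySem.Set.len (PySem.Set.inter (N.getD v PySem.Set.empty) (N.getD u PySem.Set.empty)))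
      else true))

-- ===== PORT B =====
-- adj.setdefault(a, set()).add(b); adj.setdefault(b, set()).add(a)
def pvStepB (d : PySem.Dict Int (PySem.Set Int)) (p : Int × Int) : PySem.Dict Int (PySem.Set Int) :=
  let d1 := d.insert p.1 (PySem.Set.add (d.getD p.1 PySem.Set.empty) p.2)
  d1.insert p.2 (PySem.Set.add (d1.getD p.2 PySem.Set.empty) p.1)
def pyB_adj (games : List (Int × Int)) : PySem.Dict Int (PySem.Set Int) :=
  games.foldl pvStepB PySem.Dict.empty

-- common[(u,v)] = common.get((u,v), 0) + 1; common[(v,u)] = common.get((v,u), 0) + 1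
def pvBump (d : PySem.Dict (Int × Int) Int) (u v : Int) : PySem.Dict (Int × Int) Int :=
  let d1 := d.insert (u, v) (d.getD (u, v) 0 + 1)
  d1.insert (v, u) (d1.getD (v, u) 0 + 1)
-- inner body: 'for v in seen: bump; seen.append(u)', state = (common, seen)
def pvWedgeStep (p : PySem.Dict (Int × Int) Int × List Int) (u : Int) :
    PySem.Dict (Int × Int) Int × List Int :=
  (p.2.foldl (fun d v => pvBump d u v) p.1, p.2 ++ [u])
-- one middle vertex w with neighbor set ns: 'seen = []; for u in adj[w]: …'
def pvWedgeAt (d : PySem.Dict (Int × Int) Int) (ns : PySem.Set Int) : PySem.Dict (Int × Int) Int :=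
  (List.foldl pvWedgeStep (d, []) ns).1
-- common = {}; for w in adj: …
def pyB_common (games : List (Int × Int)) : PySem.Dict (Int × Int) Int :=
  (pyB_adj games).keys.foldl
    (fun d w => pvWedgeAt d ((pyB_adj games).getD w PySem.Set.empty)) PySem.Dict.empty

def gamesOK_alt (games : List (Int × Int)) : Bool :=
  let adj := pyB_adj games
  if adj.size = 0 then false
  else if PySem.Set.len (PySem.Set.ofList (adj.values.map PySem.Set.len)) ≠ 1 then false
  else
    let common := pyB_common games
    adj.keys.all (fun u => adj.keys.all (fun v =>
      if v ≠ u ∧ ¬ (PySem.Set.contains (adj.getD v PySem.Set.empty) u = true) then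
        decide (2 ≤ common.getD (u, v) 0)
      else true))

-- ===== PRECONDITION & SPEC =====
def Spec_gamesOK (games : List (Int × Int)) (out : Bool) : Prop := out = gamesOK_alt games
instance (games : List (Int × Int)) (out : Bool) : Decidable (Spec_gamesOK games out) := by unfold Spec_gamesOK; infer_instance

-- ===== CLAIM (what is proved, stated in full; the proofs are below) =====
def Claim_equal_gamesOK : Prop := ∀ (games : List (Int × Int)), Dom_gamesOK games → Spec_gamesOK games (gamesOK games)

-- ===== LEMMAS AND PROOFS =====

-- w is a neighbour of u (some game joins them, in either orientation)
def pvNb (games : List (Int × Int)) (u w : Int) : Prop := (u, w) ∈ games ∨ (w, u) ∈ games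
-- u is an endpoint of some game
def pvIsV (games : List (Int × Int)) (u : Int) : Prop := ∃ p ∈ games, p.1 = u ∨ p.2 = u

theorem pvNb_symm (games : List (Int × Int)) (u w : Int) : pvNb games u w ↔ pvNb games w u := by
  unfold pvNb; tauto

theorem mem_pyA_E (games : List (Int × Int)) (p : Int × Int) :
    p ∈ pyA_E games ↔ p ∈ games ∨ (p.2, p.1) ∈ games := by
  simp only [pyA_E, PySem.Set.mem_union, PySem.Set.mem_ofList, List.mem_map]
  constructor
  · rintro (h | ⟨q, hq, rfl⟩)
    · exact Or.inl h
    · exact Or.inr hq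
  · rintro (h | h)
    · exact Or.inl h
    · exact Or.inr ⟨(p.2, p.1), h, rfl⟩

theorem mem_pyA_S (games : List (Int × Int)) (u : Int) :
    u ∈ pyA_S games ↔ pvIsV games u := by
  simp only [pyA_S, PySem.Set.mem_union, PySem.Set.mem_ofList, List.mem_map, pvIsV]
  constructor
  · rintro (⟨p, hp, rfl⟩ | ⟨p, hp, rfl⟩)
    · exact ⟨p, hp, Or.inl rfl⟩
    · exact ⟨p, hp, Or.inr rfl⟩
  · rintro ⟨p, hp, (rfl | rfl)⟩
    · exact Or.inl ⟨p, hp, rfl⟩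
    · exact Or.inr ⟨p, hp, rfl⟩

theorem mem_pyA_nbr (games : List (Int × Int)) (x w : Int) :
    w ∈ pyA_nbr games x ↔ pvNb games x w := by
  simp only [pyA_nbr, PySem.Set.mem_ofList, List.mem_map, List.mem_filter, beq_iff_eq]
  constructor
  · rintro ⟨q, ⟨hq, h1⟩, rfl⟩
    have : q = (x, q.2) := by exact Prod.ext h1 rfl
    rw [this] at hq
    rcases (mem_pyA_E games (x, q.2)).mp hq with h | h
    · exact Or.inl h
    · exact Or.inr h
  · intro h
    refine ⟨(x, w), ⟨?_, rfl⟩, rfl⟩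
    exact (mem_pyA_E games (x, w)).mpr h

theorem isV_iff_mem_E_fst (games : List (Int × Int)) (u : Int) :
    pvIsV games u ↔ u ∈ (pyA_E games).map (fun p => p.1) := by
  simp only [List.mem_map, pvIsV]
  constructor
  · rintro ⟨p, hp, (rfl | rfl)⟩
    · exact ⟨p, (mem_pyA_E games p).mpr (Or.inl hp), rfl⟩
    · exact ⟨(p.2, p.1), (mem_pyA_E games (p.2, p.1)).mpr (Or.inr (by simpa using hp)), rfl⟩
  · rintro ⟨q, hq, rfl⟩
    rcases (mem_pyA_E games q).mp hq with h | h
    · exact ⟨q, h, Or.inl rfl⟩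
    · exact ⟨(q.2, q.1), h, Or.inr rfl⟩

theorem getD_foldl_insert_fn {ν : Type} (l : List (Int × Int)) (g : Int → ν)
    (d : PySem.Dict Int ν) (u : Int) (d0 : ν) :
    (l.foldl (fun d p => d.insert p.1 (g p.1)) d).getD u d0 =
      if u ∈ l.map (fun p => p.1) then g u else d.getD u d0 := by
  induction l generalizing d with
  | nil => simp
  | cons p l ih =>
    simp only [List.foldl_cons, List.map_cons, List.mem_cons]
    rw [ih]
    by_cases h : u ∈ l.map (fun p => p.1)
    · simp [h]
    · by_cases h2 : u = p.1
      · simp [h2]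
      · simp [h, h2, PySem.Dict.getD_insert]

theorem getD_pyA_N (games : List (Int × Int)) (u : Int) (h : pvIsV games u) :
    (pyA_N games).getD u PySem.Set.empty = pyA_nbr games u := by
  rw [pyA_N, getD_foldl_insert_fn]
  rw [if_pos ((isV_iff_mem_E_fst games u).mp h)]

-- invariant of B's adjacency fold
theorem pyB_adj_inv (l : List (Int × Int)) (d : PySem.Dict Int (PySem.Set Int))
    (hk : d.keys.Nodup) (hv : ∀ u, ((d.getD u PySem.Set.empty) : List Int).Nodup) :
    (l.foldl pvStepB d).keys.Nodup ∧
    (∀ u, (((l.foldl pvStepB d).getD u PySem.Set.empty) : List Int).Nodup) ∧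
    (∀ u w, w ∈ (l.foldl pvStepB d).getD u PySem.Set.empty ↔
        w ∈ d.getD u PySem.Set.empty ∨ (u, w) ∈ l ∨ (w, u) ∈ l) ∧
    (∀ u, u ∈ (l.foldl pvStepB d).keys ↔ u ∈ d.keys ∨ pvIsV l u) := by
  induction l generalizing d with
  | nil => refine ⟨hk, hv, ?_, ?_⟩ <;> simp [pvIsV]
  | cons p l ih =>
    obtain ⟨a, b⟩ := p
    have hk' : ((pvStepB d (a, b)).keys).Nodup :=
      PySem.Dict.nodup_keys_insert _ _ _ (PySem.Dict.nodup_keys_insert _ _ _ hk)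
    have hgetD : ∀ u, (pvStepB d (a, b)).getD u PySem.Set.empty =
        if u = b then PySem.Set.add (if b = a then PySem.Set.add (d.getD a PySem.Set.empty) b else d.getD b PySem.Set.empty) a
        else if u = a then PySem.Set.add (d.getD a PySem.Set.empty) b
        else d.getD u PySem.Set.empty := by
      intro u
      simp only [pvStepB, PySem.Dict.getD_insert]
    have hv' : ∀ u, (((pvStepB d (a, b)).getD u PySem.Set.empty) : List Int).Nodup := by
      intro u
      rw [hgetD u]
      split_ifs with h1 h2 h3
      · exact PySem.Set.nodup_add _ _ (PySem.Set.nodup_add _ _ (hv a))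
      · exact PySem.Set.nodup_add _ _ (hv b)
      · exact PySem.Set.nodup_add _ _ (hv a)
      · exact hv u
    simp only [List.foldl_cons]
    obtain ⟨c1, c2, c3, c4⟩ := ih (pvStepB d (a, b)) hk' hv'
    refine ⟨c1, c2, ?_, ?_⟩
    · intro u w
      rw [c3 u w, hgetD u]
      by_cases h1 : u = b <;> by_cases h2 : u = a <;> by_cases h3 : b = a
      · subst h1; subst h3; simp [PySem.Set.mem_add, Prod.ext_iff]; tauto
      · exfalso; omega
      · exfalso; omega
      · subst h1; simp [h3, PySem.Set.mem_add, Prod.ext_iff]; tauto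
      · exfalso; omega
      · have h4 : ¬ a = b := fun h => h3 h.symm
        subst h2; simp [h4, PySem.Set.mem_add, Prod.ext_iff]; tauto
      · simp [h1, h2, Prod.ext_iff]
      · simp [h1, h2, Prod.ext_iff]
    · intro u
      have hkeys : u ∈ (pvStepB d (a, b)).keys ↔ u = b ∨ u = a ∨ u ∈ d.keys := by
        simp [pvStepB, PySem.Dict.mem_keys_insert]
      rw [c4 u, hkeys]
      simp only [pvIsV, List.mem_cons]
      constructor
      · rintro ((h | h | h) | ⟨q, hq, hh⟩)
        · exact Or.inr ⟨(a, b), Or.inl rfl, Or.inr h.symm⟩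
        · exact Or.inr ⟨(a, b), Or.inl rfl, Or.inl h.symm⟩
        · exact Or.inl h
        · exact Or.inr ⟨q, Or.inr hq, hh⟩
      · rintro (h | ⟨q, (rfl | hq), hh⟩)
        · exact Or.inl (Or.inr (Or.inr h))
        · rcases hh with h | h
          · exact Or.inl (Or.inr (Or.inl h.symm))
          · exact Or.inl (Or.inl h.symm)
        · exact Or.inr ⟨q, hq, hh⟩

theorem nodup_keys_adj (games : List (Int × Int)) : (pyB_adj games).keys.Nodup := by
  exact (pyB_adj_inv games PySem.Dict.empty (by simp) (by intro u; simp [PySem.Dict.getD_empty, PySem.Set.empty])).1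

theorem nodup_getD_adj (games : List (Int × Int)) (u : Int) :
    (((pyB_adj games).getD u PySem.Set.empty) : List Int).Nodup := by
  exact (pyB_adj_inv games PySem.Dict.empty (by simp) (by intro u; simp [PySem.Dict.getD_empty, PySem.Set.empty])).2.1 u

theorem mem_getD_adj (games : List (Int × Int)) (u w : Int) :
    w ∈ (pyB_adj games).getD u PySem.Set.empty ↔ pvNb games u w := by
  have h := (pyB_adj_inv games PySem.Dict.empty (by simp) (by intro u; simp [PySem.Dict.getD_empty, PySem.Set.empty])).2.2.1 u w
  rw [pyB_adj, h]
  simp [PySem.Dict.getD_empty, PySem.Set.empty, pvNb]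

theorem mem_keys_adj (games : List (Int × Int)) (u : Int) :
    u ∈ (pyB_adj games).keys ↔ pvIsV games u := by
  have h := (pyB_adj_inv games PySem.Dict.empty (by simp) (by intro u; simp [PySem.Dict.getD_empty, PySem.Set.empty])).2.2.2 u
  rw [pyB_adj, h]
  simp

theorem pvNb_isV (games : List (Int × Int)) {v w : Int} (h : pvNb games v w) : pvIsV games w := by
  rcases h with h | h
  · exact ⟨(v, w), h, Or.inr rfl⟩
  · exact ⟨(w, v), h, Or.inl rfl⟩

-- both neighbour sets of a vertex have the same members, hence the same size
theorem len_nbr_eq (games : List (Int × Int)) (u : Int) (h : pvIsV games u) :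
    PySem.Set.len ((pyA_N games).getD u PySem.Set.empty) =
      PySem.Set.len ((pyB_adj games).getD u PySem.Set.empty) := by
  have hA : (((pyA_N games).getD u PySem.Set.empty : List Int)).Perm ((pyB_adj games).getD u PySem.Set.empty) := by
    rw [List.perm_ext_iff_of_nodup (by rw [getD_pyA_N games u h]; exact PySem.Set.nodup_ofList _) (nodup_getD_adj games u)]
    intro w
    rw [getD_pyA_N games u h, mem_pyA_nbr, mem_getD_adj]
  simp only [PySem.Set.len, hA.length_eq]

-- |N[v] ∩ N[u]| = number of middle vertices adjacent to both u and v
theorem common_len (games : List (Int × Int)) (u v : Int) (hu : pvIsV games u) (hv : pvIsV games v) :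
    PySem.Set.len (PySem.Set.inter ((pyA_N games).getD v PySem.Set.empty) ((pyA_N games).getD u PySem.Set.empty)) =
      ((pyB_adj games).keys.countP (fun w =>
        PySem.Set.contains ((pyB_adj games).getD w PySem.Set.empty) u &&
        PySem.Set.contains ((pyB_adj games).getD w PySem.Set.empty) v) : Int) := by
  rw [List.countP_eq_length_filter]
  have hperm : ((PySem.Set.inter ((pyA_N games).getD v PySem.Set.empty) ((pyA_N games).getD u PySem.Set.empty)) : List Int).Perm
      ((pyB_adj games).keys.filter (fun w =>
        PySem.Set.contains ((pyB_adj games).getD w PySem.Set.empty) u &&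
        PySem.Set.contains ((pyB_adj games).getD w PySem.Set.empty) v)) := by
    rw [List.perm_ext_iff_of_nodup
      (PySem.Set.nodup_inter _ _ (by rw [getD_pyA_N games v hv]; exact PySem.Set.nodup_ofList _))
      ((nodup_keys_adj games).filter _)]
    intro w
    rw [PySem.Set.mem_inter, List.mem_filter, getD_pyA_N games v hv, getD_pyA_N games u hu,
      mem_pyA_nbr, mem_pyA_nbr]
    simp only [Bool.and_eq_true, PySem.Set.contains_iff, mem_getD_adj, mem_keys_adj]
    constructor
    · rintro ⟨h1, h2⟩
      exact ⟨pvNb_isV games h1, (pvNb_symm games u w).mp h2, (pvNb_symm games v w).mp h1⟩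
    · rintro ⟨_, h2, h1⟩
      exact ⟨(pvNb_symm games w v).mp h1, (pvNb_symm games w u).mp h2⟩
  simp only [PySem.Set.len, hperm.length_eq]

-- ---- wedge-table characterisation ----

-- the list of counter keys the inner loops bump, in order
def pvIncs (seen ns : List Int) : List (Int × Int) :=
  match ns with
  | [] => []
  | u :: rest => seen.flatMap (fun v => [(u, v), (v, u)]) ++ pvIncs (seen ++ [u]) rest

theorem foldl_bump_eq (u : Int) (seen : List Int) (d : PySem.Dict (Int × Int) Int) :
    seen.foldl (fun d v => pvBump d u v) d =
      (seen.flatMap (fun v => [(u, v), (v, u)])).foldl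
        (fun d k => d.insert k (d.getD k 0 + 1)) d := by
  induction seen generalizing d with
  | nil => rfl
  | cons v rest ih =>
    simp only [List.foldl_cons, List.flatMap_cons, List.foldl_append]
    rw [← ih]
    rfl

theorem wedge_fold_eq (ns seen : List Int) (d : PySem.Dict (Int × Int) Int) :
    List.foldl pvWedgeStep (d, seen) ns =
      ((pvIncs seen ns).foldl (fun d k => d.insert k (d.getD k 0 + 1)) d, seen ++ ns) := by
  induction ns generalizing seen d with
  | nil => simp [pvIncs]
  | cons u rest ih =>
    simp only [List.foldl_cons, pvIncs, List.foldl_append]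
    rw [show pvWedgeStep (d, seen) u =
      (seen.foldl (fun d v => pvBump d u v) d, seen ++ [u]) from rfl]
    rw [foldl_bump_eq, ih]
    simp

theorem getD_wedgeAt (d : PySem.Dict (Int × Int) Int) (ns : PySem.Set Int) (k : Int × Int) :
    (pvWedgeAt d ns).getD k 0 = d.getD k 0 + ((pvIncs [] ns).count k : Int) := by
  unfold pvWedgeAt
  rw [wedge_fold_eq]
  exact PySem.Dict.getD_foldl_insert_add_one _ _ _

theorem count_flatMap_pair (seen : List Int) (x u v : Int) (huv : u ≠ v) (hnd : seen.Nodup) :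
    (seen.flatMap (fun y => [(x, y), (y, x)])).count (u, v) =
      ((if x = u ∧ v ∈ seen then 1 else 0) + (if x = v ∧ u ∈ seen then 1 else 0)) := by
  induction seen with
  | nil => simp
  | cons y rest ih =>
    have hnd' : rest.Nodup := hnd.of_cons
    simp only [List.flatMap_cons, List.count_append, List.count_cons, List.count_nil,
      List.mem_cons] at *
    rw [ih hnd']
    have h1 : ((x, y) = (u, v)) ↔ (x = u ∧ y = v) := by simp [Prod.ext_iff]
    have h2 : ((y, x) = (u, v)) ↔ (y = u ∧ x = v) := by simp [Prod.ext_iff]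
    by_cases hxu : x = u <;> by_cases hxv : x = v <;>
      by_cases hyu : y = u <;> by_cases hyv : y = v <;>
      by_cases hvr : v ∈ rest <;> by_cases hur : u ∈ rest <;>
      simp_all <;> omega

theorem count_pvIncs (ns : List Int) (seen : List Int) (u v : Int) (huv : u ≠ v)
    (hnd : (seen ++ ns).Nodup) :
    (pvIncs seen ns).count (u, v) =
      (if (u ∈ seen ++ ns) ∧ (v ∈ seen ++ ns) ∧ (u ∈ ns ∨ v ∈ ns) then 1 else 0) := by
  induction ns generalizing seen with
  | nil => simp [pvIncs]
  | cons x rest ih =>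
    have hnd2 : ((seen ++ [x]) ++ rest).Nodup := by
      rw [List.append_assoc]; simpa using hnd
    have hxseen : x ∉ seen := by
      intro h
      have := List.disjoint_of_nodup_append hnd h
      simp at this
    have hxrest : x ∉ rest := by
      have := (List.nodup_append.mp hnd).2.1
      simp at this
      exact this.1
    simp only [pvIncs, List.count_append]
    rw [count_flatMap_pair seen x u v huv (List.nodup_append.mp hnd).1, ih (seen ++ [x]) hnd2]
    have hsr : ∀ z : Int, z ∈ seen → z ∉ rest := by
      intro z hz hr
      exact List.disjoint_of_nodup_append hnd hz (by simp [hr])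
    simp only [List.mem_append, List.mem_cons]
    by_cases hxu : x = u <;> by_cases hxv : x = v <;>
      by_cases hus : u ∈ seen <;> by_cases hvs : v ∈ seen <;>
      by_cases hur : u ∈ rest <;> by_cases hvr : v ∈ rest
    all_goals (
      first
      | (exfalso; first
          | exact huv (hxu ▸ hxv ▸ rfl)
          | exact hxseen (hxu ▸ hus)
          | exact hxseen (hxv ▸ hvs)
          | exact hxrest (hxu ▸ hur)
          | exact hxrest (hxv ▸ hvr)
          | exact hsr u hus hur
          | exact hsr v hvs hvr)
      | (simp_all <;> omega))

-- the counter the outer loop builds: getD (u,v) 0 adds up the per-vertex contributions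
theorem getD_foldl_wedge (l : List Int) (g : Int → PySem.Set Int)
    (d : PySem.Dict (Int × Int) Int) (k : Int × Int) :
    (l.foldl (fun d w => pvWedgeAt d (g w)) d).getD k 0 =
      d.getD k 0 + (l.map (fun w => ((pvIncs [] (g w)).count k : Int))).sum := by
  induction l generalizing d with
  | nil => simp
  | cons w rest ih =>
    simp only [List.foldl_cons, List.map_cons, List.sum_cons]
    rw [ih, getD_wedgeAt]
    ring

theorem getD_common (games : List (Int × Int)) (u v : Int) (huv : u ≠ v) :
    (pyB_common games).getD (u, v) 0 =
      ((pyB_adj games).keys.countP (fun w =>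
        PySem.Set.contains ((pyB_adj games).getD w PySem.Set.empty) u &&
        PySem.Set.contains ((pyB_adj games).getD w PySem.Set.empty) v) : Int) := by
  unfold pyB_common
  rw [getD_foldl_wedge]
  rw [PySem.Dict.getD_empty]
  have hmap : ((pyB_adj games).keys.map
      (fun w => (((pvIncs [] ((pyB_adj games).getD w PySem.Set.empty)).count (u, v) : Nat) : Int))) =
      ((pyB_adj games).keys.map (fun w =>
        if (PySem.Set.contains ((pyB_adj games).getD w PySem.Set.empty) u &&
            PySem.Set.contains ((pyB_adj games).getD w PySem.Set.empty) v) = true then (1 : Int) else 0)) := by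
    apply List.map_congr_left
    intro w _
    rw [count_pvIncs _ [] u v huv (by simpa using nodup_getD_adj games w)]
    have hcont : ((PySem.Set.contains ((pyB_adj games).getD w PySem.Set.empty) u &&
        PySem.Set.contains ((pyB_adj games).getD w PySem.Set.empty) v) = true) ↔
        (u ∈ (pyB_adj games).getD w PySem.Set.empty ∧ v ∈ (pyB_adj games).getD w PySem.Set.empty) := by
      rw [Bool.and_eq_true, PySem.Set.contains_iff, PySem.Set.contains_iff]
    by_cases hu : u ∈ (pyB_adj games).getD w PySem.Set.empty
    · by_cases hv : v ∈ (pyB_adj games).getD w PySem.Set.empty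
      · rw [if_pos ⟨by simpa using hu, by simpa using hv, Or.inl hu⟩,
          if_pos (hcont.mpr ⟨hu, hv⟩)]
        simp
      · rw [if_neg (fun h => hv (by simpa using h.2.1)),
          if_neg (fun h => hv (hcont.mp h).2)]
        simp
    · rw [if_neg (fun h => hu (by simpa using h.1)),
        if_neg (fun h => hu (hcont.mp h).1)]
      simp
  rw [hmap, PySem.List.sum_map_ite_one_zero]
  ring

theorem setlen_ofList_eq_one_iff (xs : List Int) :
    PySem.Set.len (PySem.Set.ofList xs) = 1 ↔ ∃ a, a ∈ xs ∧ ∀ b ∈ xs, b = a := by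
  simp only [PySem.Set.len]
  rw [show ((List.length (PySem.Set.ofList xs) : Int) = 1 ↔ List.length (PySem.Set.ofList xs) = 1) by omega]
  rw [List.length_eq_one_iff]
  constructor
  · rintro ⟨a, ha⟩
    refine ⟨a, ?_, ?_⟩
    · have : a ∈ (PySem.Set.ofList xs : List Int) := by rw [ha]; exact List.mem_singleton_self a
      exact (PySem.Set.mem_ofList xs a).mp this
    · intro b hb
      have : b ∈ (PySem.Set.ofList xs : List Int) := (PySem.Set.mem_ofList xs b).mpr hb
      rw [ha] at this
      simpa using this
  · rintro ⟨a, ha, hall⟩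
    refine ⟨a, ?_⟩
    have hmem : a ∈ (PySem.Set.ofList xs : List Int) := (PySem.Set.mem_ofList xs a).mpr ha
    have hnd := PySem.Set.nodup_ofList xs
    have hsub : ∀ b ∈ (PySem.Set.ofList xs : List Int), b = a := by
      intro b hb
      exact hall b ((PySem.Set.mem_ofList xs b).mp hb)
    cases hol : (PySem.Set.ofList xs : List Int) with
    | nil => rw [hol] at hmem; simp at hmem
    | cons x t =>
      rw [hol] at hsub hnd
      have hx : x = a := hsub x (List.mem_cons_self)
      have ht : t = [] := by
        cases t with
        | nil => rfl
        | cons y t2 =>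
          have hy : y = a := hsub y (by simp)
          exfalso
          have := hnd
          simp [hx, hy] at this
      rw [hx, ht]

theorem mem_values_map_len (games : List (Int × Int)) (x : Int) :
    x ∈ (pyB_adj games).values.map PySem.Set.len ↔
      ∃ k, k ∈ (pyB_adj games).keys ∧ x = PySem.Set.len ((pyB_adj games).getD k PySem.Set.empty) := by
  simp only [PySem.Dict.values, PySem.Dict.keys, List.map_map, List.mem_map, Function.comp]
  constructor
  · rintro ⟨p, hp, rfl⟩
    refine ⟨p.1, ⟨p, hp, rfl⟩, ?_⟩
    rw [PySem.Dict.getD_of_mem_items (pyB_adj games) (by exact hp) (nodup_keys_adj games)]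
  · rintro ⟨k, ⟨p, hp, rfl⟩, rfl⟩
    refine ⟨p, hp, ?_⟩
    rw [PySem.Dict.getD_of_mem_items (pyB_adj games) (by exact hp) (nodup_keys_adj games)]

theorem size_adj_zero_iff (games : List (Int × Int)) :
    (pyB_adj games).size = 0 ↔ ∀ u, ¬ pvIsV games u := by
  constructor
  · intro h u hu
    have : u ∈ (pyB_adj games).keys := (mem_keys_adj games u).mpr hu
    simp only [PySem.Dict.keys, List.mem_map] at this
    obtain ⟨p, hp, _⟩ := this
    have := List.length_pos_of_mem hp
    simp only [PySem.Dict.size] at h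
    omega
  · intro h
    simp only [PySem.Dict.size, List.length_eq_zero_iff]
    by_contra hne
    obtain ⟨p, hp⟩ := List.exists_mem_of_ne_nil _ hne
    have : p.1 ∈ (pyB_adj games).keys := PySem.Dict.mem_keys_of_mem_items _ hp
    exact h p.1 ((mem_keys_adj games p.1).mp this)

theorem gamesOK_eq (games : List (Int × Int)) : gamesOK games = gamesOK_alt games := by
  by_cases hg : games = []
  · subst hg; rfl
  · obtain ⟨p, hp⟩ := List.exists_mem_of_ne_nil games hg
    have hVp : pvIsV games p.1 := ⟨p, hp, Or.inl rfl⟩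
    have hsize : ¬ ((pyB_adj games).size = 0) := by
      rw [size_adj_zero_iff]
      exact fun h => h p.1 hVp
    have hmemdeg : ∀ x, (x ∈ (pyA_S games).map (fun u => PySem.Set.len ((pyA_N games).getD u PySem.Set.empty)) ↔
        x ∈ (pyB_adj games).values.map PySem.Set.len) := by
      intro x
      rw [mem_values_map_len]
      simp only [List.mem_map]
      constructor
      · rintro ⟨u, hu, rfl⟩
        have hVu := (mem_pyA_S games u).mp hu
        exact ⟨u, (mem_keys_adj games u).mpr hVu, len_nbr_eq games u hVu⟩
      · rintro ⟨k, hk, rfl⟩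
        have hVk := (mem_keys_adj games k).mp hk
        exact ⟨k, (mem_pyA_S games k).mpr hVk, len_nbr_eq games k hVk⟩
    have hguard : (PySem.Set.len (PySem.Set.ofList ((pyA_S games).map (fun u => PySem.Set.len ((pyA_N games).getD u PySem.Set.empty)))) = 1 ↔
        PySem.Set.len (PySem.Set.ofList ((pyB_adj games).values.map PySem.Set.len)) = 1) := by
      rw [setlen_ofList_eq_one_iff, setlen_ofList_eq_one_iff]
      constructor
      · rintro ⟨a, h1, h2⟩
        exact ⟨a, (hmemdeg a).mp h1, fun b hb => h2 b ((hmemdeg b).mpr hb)⟩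
      · rintro ⟨a, h1, h2⟩
        exact ⟨a, (hmemdeg a).mpr h1, fun b hb => h2 b ((hmemdeg b).mp hb)⟩
    have hcond : ∀ u v : Int, pvIsV games u →
        ((v ≠ u ∧ ¬ (PySem.Set.contains ((pyA_N games).getD v PySem.Set.empty) u = true)) ↔
         (v ≠ u ∧ ¬ (PySem.Set.contains ((pyB_adj games).getD v PySem.Set.empty) u = true))) := by
      intro u v _
      by_cases hVv : pvIsV games v
      · rw [PySem.Set.contains_iff, PySem.Set.contains_iff, getD_pyA_N games v hVv,
          mem_pyA_nbr, mem_getD_adj]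
      · have h1 : (pyA_N games).getD v PySem.Set.empty = PySem.Set.empty := by
          rw [pyA_N, getD_foldl_insert_fn, if_neg (fun h => hVv ((isV_iff_mem_E_fst games v).mpr h))]
          simp [PySem.Dict.getD_empty]
        have h2 : ∀ w, ¬ w ∈ (pyB_adj games).getD v PySem.Set.empty := by
          intro w hw
          exact hVv (pvNb_isV games (Or.symm ((mem_getD_adj games v w).mp hw)))
        rw [PySem.Set.contains_iff, PySem.Set.contains_iff, h1]
        simp only [PySem.Set.empty, List.mem_nil_iff]
        constructor
        · rintro ⟨hne, -⟩
          exact ⟨hne, h2 u⟩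
        · rintro ⟨hne, -⟩
          exact ⟨hne, fun h => h⟩
    have hall : (pyA_S games).all (fun u => (pyA_S games).all (fun v =>
        if v ≠ u ∧ ¬ (PySem.Set.contains ((pyA_N games).getD v PySem.Set.empty) u = true) then
          decide (2 ≤ PySem.Set.len (PySem.Set.inter ((pyA_N games).getD v PySem.Set.empty) ((pyA_N games).getD u PySem.Set.empty)))
        else true)) =
        (pyB_adj games).keys.all (fun u => (pyB_adj games).keys.all (fun v =>
        if v ≠ u ∧ ¬ (PySem.Set.contains ((pyB_adj games).getD v PySem.Set.empty) u = true) then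
          decide (2 ≤ (pyB_common games).getD (u, v) 0)
        else true)) := by
      rw [Bool.eq_iff_iff, List.all_eq_true, List.all_eq_true]
      constructor
      · intro h u hu
        have hVu := (mem_keys_adj games u).mp hu
        have h' := h u ((mem_pyA_S games u).mpr hVu)
        rw [List.all_eq_true] at h' ⊢
        intro v hv
        have hVv := (mem_keys_adj games v).mp hv
        have h'' := h' v ((mem_pyA_S games v).mpr hVv)
        by_cases hc : v ≠ u ∧ ¬ (PySem.Set.contains ((pyB_adj games).getD v PySem.Set.empty) u = true)
        · rw [if_pos hc]
          rw [if_pos ((hcond u v hVu).mpr hc)] at h''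
          rw [getD_common games u v (fun h => hc.1 h.symm), ← common_len games u v hVu hVv]
          exact h''
        · rw [if_neg hc]
      · intro h u hu
        have hVu := (mem_pyA_S games u).mp hu
        have h' := h u ((mem_keys_adj games u).mpr hVu)
        rw [List.all_eq_true] at h' ⊢
        intro v hv
        have hVv := (mem_pyA_S games v).mp hv
        have h'' := h' v ((mem_keys_adj games v).mpr hVv)
        by_cases hc : v ≠ u ∧ ¬ (PySem.Set.contains ((pyA_N games).getD v PySem.Set.empty) u = true)
        · rw [if_pos hc]
          rw [if_pos ((hcond u v hVu).mp hc)] at h''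
          rw [getD_common games u v (fun h => hc.1 h.symm), ← common_len games u v hVu hVv] at h''
          exact h''
        · rw [if_neg hc]
    simp only [gamesOK, gamesOK_alt]
    split_ifs with h1 h2 h3
    · rfl
    · exact absurd (hguard.mpr (not_not.mp h2)) h1
    · exact absurd (hguard.mp (not_not.mp h1)) h3
    · exact hall

-- ===== VERDICT (by name: the statement is the Claim_ definition above) =====
theorem gamesOK_spec : Claim_equal_gamesOK := by
  intro games _
  unfold Spec_gamesOK
  exact gamesOK_eq games
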